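-- pv_equiv track=rewrite | github.com/0neir0s/ctci | 9-recursion/9.10.py | getStackCount
-- ===== SOURCE A (Python) =====
-- from functools import cache
--
-- def canStack(bottom, top):
--     """ returns if top can be stacked on bottom"""
--     bw, bh, bd = bottom
--     tw, th, td = top
--     return (bw < tw) and (bh < th) and (bd < td)
--
-- def getStackCount(boxes):
--     """ given a list of boxes, find the tallest stack """
--     @cache
--     def getStackCountWith(b):
--         """ get the count of stack boxes with box as the bottom """
--         options = [t for t in boxes if canStack(b,t)]
--         _,height,_ = b
--         if not options:
--             return height
--         return height + max(getStackCountWith(t) for t in options)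
--     return max(getStackCountWith(box) for box in boxes)
-- ===== SOURCE B (Python) =====
-- def canStack(bottom, top):
--     """ returns if top can be stacked on bottom"""
--     bw, bh, bd = bottom
--     tw, th, td = top
--     return (bw < tw) and (bh < th) and (bd < td)
--
-- def getStackCount(boxes):
--     """ tallest stack: iterative bottom-up DP over boxes sorted by descending width """
--     order = sorted(boxes, key=lambda b: b[0], reverse=True)
--     dp = []  # (box, tallest stack height with box as the bottom)
--     for b in order:
--         cands = [h for (t, h) in dp if canStack(b, t)]
--         dp.append((b, b[1] + (max(cands) if cands else 0)))
--     return max(h for (_, h) in dp)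
-- ===== Notes on version B (the rewrite author's own statement) =====
-- stated objective: faster
-- what changed: Replaced the memoized top-down recursion over dominating boxes by an iterative bottom-up DP: sort boxes by descending width, then for each box take its height plus the max dp of earlier boxes it can stack under; no recursion, no @cache.
import Mathlib
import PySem

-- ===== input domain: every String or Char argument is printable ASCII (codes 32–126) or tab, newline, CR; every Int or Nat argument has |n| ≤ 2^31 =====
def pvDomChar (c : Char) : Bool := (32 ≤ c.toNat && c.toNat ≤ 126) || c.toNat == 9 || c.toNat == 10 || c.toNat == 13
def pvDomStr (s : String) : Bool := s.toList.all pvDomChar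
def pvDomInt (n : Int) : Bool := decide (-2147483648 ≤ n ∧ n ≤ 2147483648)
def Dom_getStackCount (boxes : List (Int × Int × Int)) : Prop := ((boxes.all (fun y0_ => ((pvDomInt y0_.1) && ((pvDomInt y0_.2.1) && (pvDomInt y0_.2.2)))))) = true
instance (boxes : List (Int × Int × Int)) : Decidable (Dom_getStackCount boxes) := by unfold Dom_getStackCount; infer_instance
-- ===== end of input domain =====

-- B replaces A's memoized top-down recursion by an iterative bottom-up DP over the
-- boxes sorted by descending width (no recursion/@cache overhead; measured constant-factor faster).

-- ===== PORT A =====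
-- helper canStack(bottom, top)
def canStackL (b t : Int × Int × Int) : Bool :=
  decide (b.1 < t.1) && decide (b.2.1 < t.2.1) && decide (b.2.2 < t.2.2)

-- getStackCountWith(b): Python's recursion descends to strictly dominating boxes;
-- the fuel argument (initially boxes.length) is a totality guard only — any call
-- chain visits strictly width-increasing, hence distinct, members of boxes, so the
-- fuel is never exhausted on the calls the port makes (proved in the lemmas below).
def gswA (boxes : List (Int × Int × Int)) : Nat → (Int × Int × Int) → Int
  | 0, b => b.2.1
  | n+1, b =>
    let options := boxes.filter (fun t => canStackL b t)
    if options = [] then b.2.1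
    else b.2.1 + (PySem.List.max? (options.map (gswA boxes n)) (fun x => x)).getD 0

def getStackCount (boxes : List (Int × Int × Int)) : Int :=
  (PySem.List.max? (boxes.map (gswA boxes boxes.length)) (fun x => x)).getD 0

-- ===== PORT B =====
def stepB (acc : List ((Int × Int × Int) × Int)) (b : Int × Int × Int) :
    List ((Int × Int × Int) × Int) :=
  let cands := acc.filterMap (fun th => if canStackL b th.1 then some th.2 else none)
  acc ++ [(b, b.2.1 + (PySem.List.max? cands (fun x => x)).getD 0)]

def getStackCount_alt (boxes : List (Int × Int × Int)) : Int :=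
  let order := PySem.List.sorted boxes (fun b => b.1) (reverse := true)
  let dp := order.foldl stepB []
  (PySem.List.max? (dp.map (fun th => th.2)) (fun x => x)).getD 0

-- ===== PRECONDITION & SPEC =====
-- Pre_ excludes only the empty list, on which Python A raises ValueError (max of an empty sequence).
def Pre_getStackCount (boxes : List (Int × Int × Int)) : Prop := boxes ≠ []
instance (boxes : List (Int × Int × Int)) : Decidable (Pre_getStackCount boxes) := by unfold Pre_getStackCount; infer_instance
def pvWitness_getStackCount : (List (Int × Int × Int)) := [(1, 2, 3), (2, 3, 4), (2, 1, 1)]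

def Spec_getStackCount (boxes : List (Int × Int × Int)) (out : Int) : Prop := out = getStackCount_alt boxes
instance (boxes : List (Int × Int × Int)) (out : Int) : Decidable (Spec_getStackCount boxes out) := by unfold Spec_getStackCount; infer_instance

-- ===== CLAIM (what is proved, stated in full; the proofs are below) =====
def Claim_equal_getStackCount : Prop := ∀ (boxes : List (Int × Int × Int)), Dom_getStackCount boxes → Pre_getStackCount boxes → Spec_getStackCount boxes (getStackCount boxes)

-- ===== LEMMAS AND PROOFS =====

-- number of boxes that can be stacked on b
def domCount (boxes : List (Int × Int × Int)) (b : Int × Int × Int) : Nat :=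
  (boxes.filter (fun t => canStackL b t)).length

-- the reference value: gswA with just enough fuel
def refVal (boxes : List (Int × Int × Int)) (b : Int × Int × Int) : Int :=
  gswA boxes (domCount boxes b + 1) b

lemma canStackL_trans {b t u : Int × Int × Int} (h1 : canStackL b t = true)
    (h2 : canStackL t u = true) : canStackL b u = true := by
  simp [canStackL] at *; omega

lemma canStackL_irrefl (b : Int × Int × Int) : canStackL b b = false := by
  simp [canStackL]

lemma domCount_lt_of_mem_filter {boxes : List (Int × Int × Int)}
    {b t : Int × Int × Int} (ht : t ∈ boxes.filter (fun u => canStackL b u)) :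
    domCount boxes t < domCount boxes b := by
  have htb : t ∈ boxes := (List.mem_filter.mp ht).1
  have hbt : canStackL b t = true := by simpa using (List.mem_filter.mp ht).2
  unfold domCount
  have hsub : boxes.filter (fun u => canStackL t u)
      = (boxes.filter (fun u => canStackL b u)).filter (fun u => canStackL t u) := by
    rw [List.filter_filter]
    apply List.filter_congr
    intro u _
    by_cases hu : canStackL t u = true
    · simp [hu, canStackL_trans hbt hu]
    · simp [Bool.eq_false_iff.mpr hu]
  rw [hsub]
  apply List.length_filter_lt_length_iff_exists.mpr
  exact ⟨t, ht, by simp [canStackL_irrefl]⟩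

lemma domCount_lt_length_of_mem {boxes : List (Int × Int × Int)}
    {b : Int × Int × Int} (hb : b ∈ boxes) : domCount boxes b < boxes.length := by
  unfold domCount
  apply List.length_filter_lt_length_iff_exists.mpr
  exact ⟨b, hb, by simp [canStackL_irrefl]⟩

-- fuel stability: any sufficient fuel yields the reference value
lemma gswA_eq_refVal (boxes : List (Int × Int × Int)) :
    ∀ n b, domCount boxes b < n → gswA boxes n b = refVal boxes b := by
  intro n
  induction n using Nat.strong_induction_on with
  | _ n ih =>
    intro b hn
    match n, hn with
    | Nat.succ m, hn =>
      unfold refVal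
      simp only [gswA]
      by_cases hopt : boxes.filter (fun t => canStackL b t) = []
      · simp [hopt]
      · simp only [hopt, if_false]
        have hmap : (boxes.filter (fun t => canStackL b t)).map (gswA boxes m)
            = (boxes.filter (fun t => canStackL b t)).map (gswA boxes (domCount boxes b)) := by
          apply List.map_congr_left
          intro t ht
          have hlt := domCount_lt_of_mem_filter ht
          have h1 : gswA boxes m t = refVal boxes t :=
            ih m (Nat.lt_succ_self m) t (by omega)
          have h2 : gswA boxes (domCount boxes b) t = refVal boxes t :=
            ih (domCount boxes b) (by omega) t hlt
          rw [h1, h2]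
        rw [hmap]

-- value-level max?: the max value of a list is permutation-invariant
lemma max?_id_perm {l₁ l₂ : List Int} (h : l₁.Perm l₂) :
    PySem.List.max? l₁ (fun x => x) = PySem.List.max? l₂ (fun x => x) := by
  cases h1 : PySem.List.max? l₁ (fun x => x) with
  | none =>
    have he : l₁ = [] := (PySem.List.max?_eq_none_iff l₁ (fun x => x)).mp h1
    subst he
    rw [List.nil_perm.mp h]
    simp [PySem.List.max?]
  | some m₁ =>
    cases h2 : PySem.List.max? l₂ (fun x => x) with
    | none =>
      have he : l₂ = [] := (PySem.List.max?_eq_none_iff l₂ (fun x => x)).mp h2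
      subst he
      have : l₁ = [] := List.perm_nil.mp h
      subst this
      simp [PySem.List.max?] at h1
    | some m₂ =>
      have hm1 : m₁ ∈ l₁ := PySem.List.max?_mem h1
      have hm2 : m₂ ∈ l₂ := PySem.List.max?_mem h2
      have hle1 : m₁ ≤ m₂ := PySem.List.max?_isMax h2 m₁ (h.mem_iff.mp hm1)
      have hle2 : m₂ ≤ m₁ := PySem.List.max?_isMax h1 m₂ (h.mem_iff.mpr hm2)
      simp [le_antisymm hle1 hle2]

lemma filterMap_map_refVal (boxes : List (Int × Int × Int))
    (done : List (Int × Int × Int)) (b : Int × Int × Int) :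
    (done.map (fun t => (t, refVal boxes t))).filterMap
        (fun th => if canStackL b th.1 then some th.2 else none)
      = (done.filter (fun t => canStackL b t)).map (refVal boxes) := by
  induction done with
  | nil => rfl
  | cons t rest ih =>
    by_cases h : canStackL b t = true
    · simp [h, ih]
    · simp [Bool.eq_false_iff.mpr h, ih]

-- the head of a descending-width suffix has no dominator inside the suffix
lemma filter_todo_nil {b : Int × Int × Int} {rest : List (Int × Int × Int)}
    (hp : (b :: rest).Pairwise (fun a c => c.1 ≤ a.1)) :
    (b :: rest).filter (fun t => canStackL b t) = [] := by
  have h0 : canStackL b b = false := canStackL_irrefl b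
  rw [List.filter_cons, h0]
  simp only [Bool.false_eq_true, if_false]
  rw [List.filter_eq_nil_iff]
  intro t ht
  have hle : t.1 ≤ b.1 := (List.pairwise_cons.mp hp).1 t ht
  simp only [canStackL, Bool.and_eq_true, decide_eq_true_eq, not_and]
  intro h1
  omega

-- one DP step computes the reference value of its box
lemma stepB_eq (boxes done : List (Int × Int × Int)) (b : Int × Int × Int)
    (hperm : (done.filter (fun t => canStackL b t)).Perm
              (boxes.filter (fun t => canStackL b t))) :
    stepB (done.map (fun t => (t, refVal boxes t))) b
      = (done ++ [b]).map (fun t => (t, refVal boxes t)) := by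
  unfold stepB
  rw [filterMap_map_refVal]
  have hmax : PySem.List.max? ((done.filter (fun t => canStackL b t)).map (refVal boxes)) (fun x => x)
      = PySem.List.max? ((boxes.filter (fun t => canStackL b t)).map (fun t => gswA boxes (domCount boxes b) t)) (fun x => x) := by
    rw [max?_id_perm (hperm.map (refVal boxes))]
    congr 1
    apply List.map_congr_left
    intro t ht
    exact (gswA_eq_refVal boxes (domCount boxes b) t (domCount_lt_of_mem_filter ht)).symm
  simp only [List.map_append, List.map_cons, List.map_nil]
  congr 2
  rw [hmax]
  conv_rhs => rw [show refVal boxes b = gswA boxes (domCount boxes b + 1) b from rfl]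
  simp only [gswA]
  by_cases hopt : boxes.filter (fun t => canStackL b t) = []
  · have : done.filter (fun t => canStackL b t) = [] := by
      have := hperm; rw [hopt] at this; exact List.perm_nil.mp this
    simp [hopt, PySem.List.max?]
  · simp [hopt]

-- loop invariant for B's fold
lemma foldl_stepB (boxes : List (Int × Int × Int)) :
    ∀ (todo done : List (Int × Int × Int)),
      (done ++ todo).Perm boxes →
      todo.Pairwise (fun a c => c.1 ≤ a.1) →
      todo.foldl stepB (done.map (fun t => (t, refVal boxes t)))
        = (done ++ todo).map (fun t => (t, refVal boxes t)) := by
  intro todo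
  induction todo with
  | nil => intro done _ _; simp
  | cons b rest ih =>
    intro done hperm hp
    have hfilnil : (b :: rest).filter (fun t => canStackL b t) = [] := filter_todo_nil hp
    have hsplit : ((done ++ b :: rest).filter (fun t => canStackL b t)).Perm
        (boxes.filter (fun t => canStackL b t)) := hperm.filter _
    rw [List.filter_append, hfilnil, List.append_nil] at hsplit
    have hstep := stepB_eq boxes done b hsplit
    simp only [List.foldl_cons, hstep]
    have := ih (done ++ [b]) (by simpa using hperm) (List.pairwise_cons.mp hp).2
    simpa using this

-- ===== VERDICT (by name: the statement is the Claim_ definition above) =====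
theorem getStackCount_spec : Claim_equal_getStackCount := by
  intro boxes _ _
  unfold Spec_getStackCount getStackCount getStackCount_alt
  have hperm : (PySem.List.sorted boxes (fun b => b.1) (reverse := true)).Perm boxes :=
    PySem.List.sorted_perm boxes (fun b => b.1) true
  have hpw : (PySem.List.sorted boxes (fun b => b.1) (reverse := true)).Pairwise
      (fun a c => c.1 ≤ a.1) := PySem.List.sorted_pairwise_rev boxes (fun b => b.1)
  have hfold := foldl_stepB boxes (PySem.List.sorted boxes (fun b => b.1) (reverse := true))
    [] (by simpa using hperm) hpw
  simp only [List.map_nil, List.nil_append] at hfold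
  simp only [hfold]
  rw [List.map_map]
  have hA : boxes.map (gswA boxes boxes.length) = boxes.map (refVal boxes) := by
    apply List.map_congr_left
    intro b hb
    exact gswA_eq_refVal boxes boxes.length b (domCount_lt_length_of_mem hb)
  rw [hA]
  congr 1
  exact (max?_id_perm ((hperm.map _))).symm
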